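-- pv_equiv track=rewrite | github.com/joshna-ii/digibraille | translation.py | uncontracted_translation
-- ===== SOURCE A (Python) =====
-- abcx_dict = {"a": [1,0,0,0,0,0], "b": [1,1,0,0,0,0], "c": [1,0,0,1,0,0], "d": [1,0,0,1,1,0], "e": [1,0,0,0,1,0],
--                     "f": [1,1,0,1,0,0], "g": [1,1,0,1,1,0], "h": [1,1,0,0,1,0], "i": [0,1,0,1,0,0], "j": [0,1,0,1,1,0],
--                     "k": [1,0,1,0,0,0], "l": [1,1,1,0,0,0], "m": [1,0,1,1,0,0], "n": [1,0,1,1,1,0], "o": [1,0,1,0,1,0],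
--                     "p": [1,1,1,1,0,0], "q": [1,1,1,1,1,0], "r": [1,1,1,0,1,0], "s": [0,1,1,1,0,0], "t": [0,1,1,1,1,0],
--                     "u": [1,0,1,0,0,1], "v": [1,1,1,0,0,1], "w": [0,1,0,1,1,1], "x": [1,0,1,1,0,1], "y": [1,0,1,1,1,1],
--                     "z": [1,0,1,0,1,1], ".": [0,1,0,0,1,1], ",": [0,1,0,0,0,0], "#": [0,0,1,1,1,1], " ": [0,0,0,0,0,0],
--                     ";": [0,1,1,0,0,0], ":": [0,1,0,0,1,0], "/": [0,0,1,1,0,0], "?": [0,1,1,0,0,1], "!": [0,1,1,0,1,0],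
--                     "@": [0,0,1,1,1,0], "+": [0,1,1,0,1,0], "-": [0,1,0,0,1,0], "\"": [0,0,0,0,1,1], "'": [0,0,1,0,0,0],
--                     "_": [0,0,0,1,1,1], "`": [0,0,0,0,1,0]}
--
-- special_dict = {"$": ([0,0,0,1,0,0],[0,1,0,0,1,1]),"%": ([0,0,0,1,0,0],[0,1,0,0,1,0],[1,1,1,1,0,0]),
--                 "^": ([0,0,0,1,1,1],[1,1,0,0,0,1]), "&": ([0,0,0,1,0,0],[1,1,1,1,0,1]),
--                 "*": ([0,0,1,0,1,0],[0,0,1,0,1,0]), "(": ([0,0,0,1,0,0],[0,1,1,0,1,1]), ")": ([0,0,0,1,0,0],[0,1,1,0,1,1]),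
--                 "_": ([0,0,0,1,1,1],[1,1,1,0,0,0]), "{": ([0,0,0,1,0,0],[0,0,0,0,1,1],[0,1,1,0,1,1]),
--                 "}": ([0,0,0,1,0,0],[0,1,1,0,1,1],[0,1,1,0,0,0]), "[": ([0,0,0,1,0,0],[0,0,0,0,0,1],[0,1,1,0,1,1]),
--                 "]": ([0,0,0,1,0,0],[0,1,1,0,1,1],[0,0,0,0,0,1]), "|": ([0,0,0,1,1,1],[1,1,0,0,1,1]),
--                 "<": ([0,0,0,0,1,0],[1,0,1,0,0,0]), ">": ([0,0,0,1,0,1],[0,1,0,0,0,0]), "~": ([0,0,0,1,0,0],[1,0,0,0,1,1])}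
--
-- num_dict = {"1": [1,0,0,0,0,0], "2": [1,1,0,0,0,0], "3": [1,0,0,1,0,0], "4": [1,0,0,1,1,0], "5": [1,0,0,0,1,0],
--                     "6": [1,1,0,1,0,0], "7": [1,1,0,1,1,0], "8": [1,1,0,0,1,0], "9": [0,1,0,1,0,0], "0": [0,1,0,1,1,0]}
--
-- pre_num = [0,0,1,1,1,1]
--
-- after_num = [0,1,1,0,0,0] #only need if there isn't a space between number and alphabet
--
-- pre_cap = [0,0,0,0,0,1]
--
-- def uncontracted_translation(s):
--     cap = False
--     num = False
--     trans = []
--     for c in s: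
--         if c.isdigit():
--             cap = False
--             if num:
--                 trans.append(num_dict[c])
--             else:
--                 trans.append(pre_num)
--                 trans.append(num_dict[c])
--                 num = True
--         elif c.isupper():
--             if num:
--                 trans.append(after_num)
--             num = False
--             if cap:
--                 trans.append(abcx_dict[c.lower()])
--             else:
--                 trans.append(pre_cap)
--                 trans.append(pre_cap)
--                 trans.append(abcx_dict[c.lower()])
--                 cap = True
--         elif c in abcx_dict:
--             if num and c.islower():
--                 trans.append(after_num)
--             num = False
--             cap = False
--             trans.append(abcx_dict[c])
--         elif c in special_dict:
--             num = False
--             cap = False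
--             for e in special_dict[c]:
--                 trans.append(e)
--     return trans
-- ===== SOURCE B (Python) =====
-- from itertools import groupby
--
-- # Braille cells stored as 6-bit masks (bit i = dot i+1); decoded on use.
-- ABCX = {"a": 1, "b": 3, "c": 9, "d": 25, "e": 17, "f": 11, "g": 27, "h": 19,
--         "i": 10, "j": 26, "k": 5, "l": 7, "m": 13, "n": 29, "o": 21, "p": 15,
--         "q": 31, "r": 23, "s": 14, "t": 30, "u": 37, "v": 39, "w": 58, "x": 45,
--         "y": 61, "z": 53, ".": 50, ",": 2, "#": 60, " ": 0, ";": 6, ":": 18,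
--         "/": 12, "?": 38, "!": 22, "@": 28, "+": 22, "-": 18, "\"": 48,
--         "'": 4, "_": 56, "`": 16}
--
-- SPECIAL = {"$": (8, 50), "%": (8, 18, 15), "^": (56, 35), "&": (8, 47),
--            "*": (20, 20), "(": (8, 54), ")": (8, 54), "_": (56, 7),
--            "{": (8, 48, 54), "}": (8, 54, 6), "[": (8, 32, 54),
--            "]": (8, 54, 32), "|": (56, 51), "<": (16, 5), ">": (40, 2),
--            "~": (8, 49)}
--
-- NUM = {"1": 1, "2": 3, "3": 9, "4": 25, "5": 17, "6": 11, "7": 27, "8": 19,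
--        "9": 10, "0": 26}
--
-- PRE_NUM = 60
-- AFTER_NUM = 6
-- PRE_CAP = 32
--
--
-- def _cells(code):
--     return [(code >> i) & 1 for i in range(6)]
--
--
-- def _cls(c):
--     """'d' digit, 'u' uppercase, 'l' lowercase letter, 'p' abcx
--     punctuation/space, 's' special; None = untranslatable (skipped)."""
--     if c.isdigit():
--         return 'd'
--     if c.isupper():
--         return 'u'
--     if c in ABCX:
--         return 'l' if c.islower() else 'p'
--     if c in SPECIAL:
--         return 's'
--     return None
--
--
-- def uncontracted_translation(s):
--     runs = [(k, list(g)) for k, g in groupby((c for c in s if _cls(c)), key=_cls)]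
--     out = []
--     for i, (k, chars) in enumerate(runs):
--         if k == 'd':
--             out.append(_cells(PRE_NUM))
--             out.extend(_cells(NUM[c]) for c in chars)
--             if i + 1 < len(runs) and runs[i + 1][0] in ('u', 'l'):
--                 out.append(_cells(AFTER_NUM))
--         elif k == 'u':
--             out.append(_cells(PRE_CAP))
--             out.append(_cells(PRE_CAP))
--             out.extend(_cells(ABCX[c.lower()]) for c in chars)
--         elif k == 's':
--             out.extend(_cells(e) for c in chars for e in SPECIAL[c])
--         else:
--             out.extend(_cells(ABCX[c]) for c in chars)
--     return out
-- ===== Notes on version B (the rewrite author's own statement) =====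
-- stated objective: alternative
-- what changed: Replaces A's character-by-character loop with mutable cap/num flags by a stateless pipeline (filter translatable chars, group maximal runs of one character class with itertools.groupby, emit each run's patterns at once with a one-run lookahead for after_num) and stores the braille tables as 6-bit integer masks decoded on use instead of literal 0/1 lists.
import Mathlib
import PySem

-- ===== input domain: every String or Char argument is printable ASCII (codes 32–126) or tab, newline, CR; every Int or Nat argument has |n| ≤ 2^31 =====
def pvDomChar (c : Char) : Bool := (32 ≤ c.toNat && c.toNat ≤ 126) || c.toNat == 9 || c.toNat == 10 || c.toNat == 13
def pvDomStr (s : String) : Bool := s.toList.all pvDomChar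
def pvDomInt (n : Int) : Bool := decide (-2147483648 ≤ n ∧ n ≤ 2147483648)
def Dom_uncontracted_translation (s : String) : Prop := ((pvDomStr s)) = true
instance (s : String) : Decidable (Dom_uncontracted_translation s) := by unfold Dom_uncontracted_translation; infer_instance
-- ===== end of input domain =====

-- B replaces A's per-character loop with mutable cap/num flags by a stateless pipeline
-- (filter translatable chars, group maximal runs of one class, emit per run with a one-run
-- lookahead for after_num) over tables stored as 6-bit masks (objective: alternative).

-- ===== PORT A =====
def abcx_dict : PySem.Dict Char (List Int) := PySem.Dict.ofList
  [('a', [1,0,0,0,0,0]), ('b', [1,1,0,0,0,0]), ('c', [1,0,0,1,0,0]), ('d', [1,0,0,1,1,0]), ('e', [1,0,0,0,1,0]),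
   ('f', [1,1,0,1,0,0]), ('g', [1,1,0,1,1,0]), ('h', [1,1,0,0,1,0]), ('i', [0,1,0,1,0,0]), ('j', [0,1,0,1,1,0]),
   ('k', [1,0,1,0,0,0]), ('l', [1,1,1,0,0,0]), ('m', [1,0,1,1,0,0]), ('n', [1,0,1,1,1,0]), ('o', [1,0,1,0,1,0]),
   ('p', [1,1,1,1,0,0]), ('q', [1,1,1,1,1,0]), ('r', [1,1,1,0,1,0]), ('s', [0,1,1,1,0,0]), ('t', [0,1,1,1,1,0]),
   ('u', [1,0,1,0,0,1]), ('v', [1,1,1,0,0,1]), ('w', [0,1,0,1,1,1]), ('x', [1,0,1,1,0,1]), ('y', [1,0,1,1,1,1]),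
   ('z', [1,0,1,0,1,1]), ('.', [0,1,0,0,1,1]), (',', [0,1,0,0,0,0]), ('#', [0,0,1,1,1,1]), (' ', [0,0,0,0,0,0]),
   (';', [0,1,1,0,0,0]), (':', [0,1,0,0,1,0]), ('/', [0,0,1,1,0,0]), ('?', [0,1,1,0,0,1]), ('!', [0,1,1,0,1,0]),
   ('@', [0,0,1,1,1,0]), ('+', [0,1,1,0,1,0]), ('-', [0,1,0,0,1,0]), ('"', [0,0,0,0,1,1]), ('\'', [0,0,1,0,0,0]),
   ('_', [0,0,0,1,1,1]), ('`', [0,0,0,0,1,0])]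

-- Python's special_dict values are tuples of lists; a tuple iterated element by element → List (List Int)
def special_dict : PySem.Dict Char (List (List Int)) := PySem.Dict.ofList
  [('$', [[0,0,0,1,0,0],[0,1,0,0,1,1]]), ('%', [[0,0,0,1,0,0],[0,1,0,0,1,0],[1,1,1,1,0,0]]),
   ('^', [[0,0,0,1,1,1],[1,1,0,0,0,1]]), ('&', [[0,0,0,1,0,0],[1,1,1,1,0,1]]),
   ('*', [[0,0,1,0,1,0],[0,0,1,0,1,0]]), ('(', [[0,0,0,1,0,0],[0,1,1,0,1,1]]), (')', [[0,0,0,1,0,0],[0,1,1,0,1,1]]),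
   ('_', [[0,0,0,1,1,1],[1,1,1,0,0,0]]), ('{', [[0,0,0,1,0,0],[0,0,0,0,1,1],[0,1,1,0,1,1]]),
   ('}', [[0,0,0,1,0,0],[0,1,1,0,1,1],[0,1,1,0,0,0]]), ('[', [[0,0,0,1,0,0],[0,0,0,0,0,1],[0,1,1,0,1,1]]),
   (']', [[0,0,0,1,0,0],[0,1,1,0,1,1],[0,0,0,0,0,1]]), ('|', [[0,0,0,1,1,1],[1,1,0,0,1,1]]),
   ('<', [[0,0,0,0,1,0],[1,0,1,0,0,0]]), ('>', [[0,0,0,1,0,1],[0,1,0,0,0,0]]), ('~', [[0,0,0,1,0,0],[1,0,0,0,1,1]])]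

def num_dict : PySem.Dict Char (List Int) := PySem.Dict.ofList
  [('1', [1,0,0,0,0,0]), ('2', [1,1,0,0,0,0]), ('3', [1,0,0,1,0,0]), ('4', [1,0,0,1,1,0]), ('5', [1,0,0,0,1,0]),
   ('6', [1,1,0,1,0,0]), ('7', [1,1,0,1,1,0]), ('8', [1,1,0,0,1,0]), ('9', [0,1,0,1,0,0]), ('0', [0,1,0,1,1,0])]

def pre_num : List Int := [0,0,1,1,1,1]
def after_num : List Int := [0,1,1,0,0,0]
def pre_cap : List Int := [0,0,0,0,0,1]

-- lookups of A's three dicts; the default [] is never reached (each branch first checks the key)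
def numPat (c : Char) : List Int := (num_dict.get? c).getD []
def abcxPat (c : Char) : List Int := (abcx_dict.get? c).getD []
def specPats (c : Char) : List (List Int) := (special_dict.get? c).getD []

-- one loop iteration of A: state (cap, num, trans)
def stepA (st : Bool × Bool × List (List Int)) (c : Char) : Bool × Bool × List (List Int) :=
  let cap := st.1; let num := st.2.1; let trans := st.2.2
  if PySem.Chars.isdigit c then
    if num then (false, true, trans ++ [numPat c])
    else (false, true, trans ++ [pre_num, numPat c])
  else if PySem.Chars.isupper c then
    if num then
      if cap then (true, false, trans ++ [after_num, abcxPat (PySem.Chars.lowerChar c)])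
      else (true, false, trans ++ [after_num, pre_cap, pre_cap, abcxPat (PySem.Chars.lowerChar c)])
    else
      if cap then (true, false, trans ++ [abcxPat (PySem.Chars.lowerChar c)])
      else (true, false, trans ++ [pre_cap, pre_cap, abcxPat (PySem.Chars.lowerChar c)])
  else if abcx_dict.contains c then
    if num && PySem.Chars.islower c then (false, false, trans ++ [after_num, abcxPat c])
    else (false, false, trans ++ [abcxPat c])
  else if special_dict.contains c then
    (false, false, trans ++ specPats c)
  else (cap, num, trans)

def uncontracted_translation (s : String) : List (List Int) :=
  (s.toList.foldl stepA (false, false, [])).2.2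

-- ===== PORT B =====
-- Source B stores each braille cell as a 6-bit mask (bit i = dot i+1), decoded by _cells
def cellsB (code : Nat) : List Int := (List.range 6).map (fun i => (((code >>> i) &&& 1 : Nat) : Int))

def abcx_codes : PySem.Dict Char Nat := PySem.Dict.ofList
  [('a', 1), ('b', 3), ('c', 9), ('d', 25), ('e', 17), ('f', 11), ('g', 27), ('h', 19),
   ('i', 10), ('j', 26), ('k', 5), ('l', 7), ('m', 13), ('n', 29), ('o', 21), ('p', 15),
   ('q', 31), ('r', 23), ('s', 14), ('t', 30), ('u', 37), ('v', 39), ('w', 58), ('x', 45),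
   ('y', 61), ('z', 53), ('.', 50), (',', 2), ('#', 60), (' ', 0), (';', 6), (':', 18),
   ('/', 12), ('?', 38), ('!', 22), ('@', 28), ('+', 22), ('-', 18), ('"', 48),
   ('\'', 4), ('_', 56), ('`', 16)]

def spec_codes : PySem.Dict Char (List Nat) := PySem.Dict.ofList
  [('$', [8, 50]), ('%', [8, 18, 15]), ('^', [56, 35]), ('&', [8, 47]),
   ('*', [20, 20]), ('(', [8, 54]), (')', [8, 54]), ('_', [56, 7]),
   ('{', [8, 48, 54]), ('}', [8, 54, 6]), ('[', [8, 32, 54]),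
   (']', [8, 54, 32]), ('|', [56, 51]), ('<', [16, 5]), ('>', [40, 2]),
   ('~', [8, 49])]

def num_codes : PySem.Dict Char Nat := PySem.Dict.ofList
  [('1', 1), ('2', 3), ('3', 9), ('4', 25), ('5', 17), ('6', 11), ('7', 27), ('8', 19),
   ('9', 10), ('0', 26)]

def PRE_NUM : Nat := 60
def AFTER_NUM : Nat := 6
def PRE_CAP : Nat := 32

-- decoded lookups (defaults never reached: each use site checked the key's class first)
def numPatB (c : Char) : List Int := cellsB ((num_codes.get? c).getD 0)
def abcxPatB (c : Char) : List Int := cellsB ((abcx_codes.get? c).getD 0)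
def specPatsB (c : Char) : List (List Int) := ((spec_codes.get? c).getD []).map cellsB

-- character classes of B's classifier _cls ('d'/'u'/'l'/'p'/'s'; none = untranslatable, skipped)
inductive BCls | d | u | l | p | s
deriving DecidableEq, Repr

def clsB (c : Char) : Option BCls :=
  if PySem.Chars.isdigit c then some .d
  else if PySem.Chars.isupper c then some .u
  else if abcx_codes.contains c then (if PySem.Chars.islower c then some .l else some .p)
  else if spec_codes.contains c then some .s
  else none

-- itertools.groupby on the classifier: maximal runs of equal class
def runsOf (cs : List Char) : List (List Char) :=
  match cs with
  | [] => []
  | c :: rest =>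
    (c :: rest.takeWhile (fun x => clsB x == clsB c)) ::
      runsOf (rest.dropWhile (fun x => clsB x == clsB c))
termination_by cs.length
decreasing_by
  simpa using Nat.lt_succ_of_le (List.length_dropWhile_le _ rest)

-- B's lookahead test: does the next run start with an uppercase or lowercase letter?
def nextIsLetter (rs : List (List Char)) : Bool :=
  match rs with
  | (d :: _) :: _ => clsB d == some BCls.u || clsB d == some BCls.l
  | _ => false

-- B's emission loop over runs, looking one run ahead for after_num
def emitRuns (runs : List (List Char)) : List (List Int) :=
  match runs with
  | [] => []
  | [] :: rs => emitRuns rs        -- unreachable: groupby runs are nonempty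
  | (c :: r) :: rs =>
    match clsB c with
    | some .d =>
      cellsB PRE_NUM :: ((c :: r).map numPatB ++
        (if nextIsLetter rs then cellsB AFTER_NUM :: emitRuns rs else emitRuns rs))
    | some .u => cellsB PRE_CAP :: cellsB PRE_CAP ::
        ((c :: r).map (fun x => abcxPatB (PySem.Chars.lowerChar x)) ++ emitRuns rs)
    | some .s => ((c :: r).map specPatsB).flatten ++ emitRuns rs
    | _ => (c :: r).map abcxPatB ++ emitRuns rs

def uncontracted_translation_alt (s : String) : List (List Int) :=
  emitRuns (runsOf (s.toList.filter (fun c => (clsB c).isSome)))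

-- ===== PRECONDITION & SPEC =====
def Spec_uncontracted_translation (s : String) (out : List (List Int)) : Prop := out = uncontracted_translation_alt s
instance (s : String) (out : List (List Int)) : Decidable (Spec_uncontracted_translation s out) := by unfold Spec_uncontracted_translation; infer_instance

-- ===== CLAIM (what is proved, stated in full; the proofs are below) =====
def Claim_equal_uncontracted_translation : Prop := ∀ (s : String), Dom_uncontracted_translation s → Spec_uncontracted_translation s (uncontracted_translation s)

-- ===== LEMMAS AND PROOFS =====

set_option maxRecDepth 8192

-- a Char is the Char.ofNat of its code point
theorem char_eq_of_toNat (c : Char) (n : Nat) (h : c.toNat = n) : c = Char.ofNat n := by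
  rw [← h, Char.ofNat_toNat]

-- ---- bridging B's coded tables to A's literal ones ----

-- lookup commutes with mapping a function over the values of an association list
theorem get?_mk_map {ν ν' : Type} (f : ν → ν') (L : List (Char × ν)) (c : Char) :
    (PySem.Dict.mk (L.map (fun p => (p.1, f p.2)))).get? c =
      ((PySem.Dict.mk L).get? c).map f := by
  induction L with
  | nil => rfl
  | cons p L ih =>
    cases p with
    | mk k v =>
      simp only [List.map_cons, PySem.Dict.get?_mk_cons]
      split_ifs <;> simp [ih]

theorem abcx_get_eq (c : Char) : abcx_dict.get? c = (abcx_codes.get? c).map cellsB := by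
  have h : abcx_dict =
      PySem.Dict.mk ((PySem.Dict.items abcx_codes).map (fun p => (p.1, cellsB p.2))) := by decide
  rw [h, get?_mk_map]

theorem num_get_eq (c : Char) : num_dict.get? c = (num_codes.get? c).map cellsB := by
  have h : num_dict =
      PySem.Dict.mk ((PySem.Dict.items num_codes).map (fun p => (p.1, cellsB p.2))) := by decide
  rw [h, get?_mk_map]

theorem spec_get_eq (c : Char) :
    special_dict.get? c = (spec_codes.get? c).map (fun l => l.map cellsB) := by
  have h : special_dict =
      PySem.Dict.mk ((PySem.Dict.items spec_codes).map (fun p => (p.1, p.2.map cellsB))) := by decide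
  rw [h, get?_mk_map]

theorem abcx_contains_eq (c : Char) : abcx_dict.contains c = abcx_codes.contains c := by
  rw [PySem.Dict.contains_eq_isSome_get?, PySem.Dict.contains_eq_isSome_get?, abcx_get_eq]
  cases abcx_codes.get? c <;> rfl

theorem spec_contains_eq (c : Char) : special_dict.contains c = spec_codes.contains c := by
  rw [PySem.Dict.contains_eq_isSome_get?, PySem.Dict.contains_eq_isSome_get?, spec_get_eq]
  cases spec_codes.get? c <;> rfl

theorem bridge_abcx (c : Char) (h : abcx_dict.contains c = true) : abcxPat c = abcxPatB c := by
  rw [PySem.Dict.contains_eq_isSome_get?, abcx_get_eq] at h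
  unfold abcxPat abcxPatB
  rw [abcx_get_eq]
  rcases hv : abcx_codes.get? c with _ | n
  · rw [hv] at h; simp at h
  · rfl

theorem bridge_spec (c : Char) (h : special_dict.contains c = true) : specPats c = specPatsB c := by
  rw [PySem.Dict.contains_eq_isSome_get?, spec_get_eq] at h
  unfold specPats specPatsB
  rw [spec_get_eq]
  rcases hv : spec_codes.get? c with _ | l
  · rw [hv] at h; simp at h
  · rfl

-- a digit char (ASCII '0'–'9') is a key of num_codes, so the lookups agree
theorem digit_mem (c : Char) (h : PySem.Chars.isdigit c = true) :
    c ∈ ['0','1','2','3','4','5','6','7','8','9'] := by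
  unfold PySem.Chars.isdigit at h
  rw [Bool.and_eq_true, decide_eq_true_eq, decide_eq_true_eq] at h
  obtain ⟨h1, h2⟩ := h
  have hlo : 48 ≤ c.toNat := h1
  have hhi : c.toNat ≤ 57 := h2
  interval_cases hn : c.toNat <;> rw [char_eq_of_toNat c _ hn] <;> decide

theorem bridge_digit (c : Char) (h : PySem.Chars.isdigit c = true) : numPat c = numPatB c := by
  have hm : num_dict.contains c = true := by
    have := digit_mem c h
    fin_cases this <;> decide
  rw [PySem.Dict.contains_eq_isSome_get?, num_get_eq] at hm
  unfold numPat numPatB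
  rw [num_get_eq]
  rcases hv : num_codes.get? c with _ | n
  · rw [hv] at hm; simp at hm
  · rfl

-- the literal constants decode from their masks
theorem pre_num_eq : pre_num = cellsB PRE_NUM := by decide
theorem after_num_eq : after_num = cellsB AFTER_NUM := by decide
theorem pre_cap_eq : pre_cap = cellsB PRE_CAP := by decide

-- ---- forward-recursive reading of A's loop (same branches, output emitted in front) ----
def aRec : List Char → Bool → Bool → List (List Int)
  | [], _, _ => []
  | c :: cs, cap, num =>
    if PySem.Chars.isdigit c then
      (if num then [numPat c] else [pre_num, numPat c]) ++ aRec cs false true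
    else if PySem.Chars.isupper c then
      (if num then [after_num] else []) ++
      (if cap then [abcxPat (PySem.Chars.lowerChar c)]
       else [pre_cap, pre_cap, abcxPat (PySem.Chars.lowerChar c)]) ++ aRec cs true false
    else if abcx_dict.contains c then
      (if num && PySem.Chars.islower c then [after_num] else []) ++ abcxPat c :: aRec cs false false
    else if special_dict.contains c then
      specPats c ++ aRec cs false false
    else aRec cs cap num

theorem foldA (cs : List Char) : ∀ (cap num : Bool) (acc : List (List Int)),
    (cs.foldl stepA (cap, num, acc)).2.2 = acc ++ aRec cs cap num := by
  induction cs with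
  | nil => intro cap num acc; simp [aRec]
  | cons c cs ih =>
    intro cap num acc
    simp only [List.foldl_cons, stepA]
    split_ifs <;> simp [aRec, *, List.append_assoc]

-- class-extraction facts (stated on A's dicts via the contains bridges)
theorem cls_d_iff (c : Char) : clsB c = some .d ↔ PySem.Chars.isdigit c = true := by
  unfold clsB; split_ifs <;> simp_all

theorem cls_u (c : Char) (h : clsB c = some .u) :
    PySem.Chars.isdigit c = false ∧ PySem.Chars.isupper c = true := by
  unfold clsB at h; split_ifs at h <;> simp_all

theorem cls_l (c : Char) (h : clsB c = some .l) :
    PySem.Chars.isdigit c = false ∧ PySem.Chars.isupper c = false ∧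
    abcx_dict.contains c = true ∧ PySem.Chars.islower c = true := by
  unfold clsB at h; rw [← abcx_contains_eq] at h; split_ifs at h <;> simp_all

theorem cls_p (c : Char) (h : clsB c = some .p) :
    PySem.Chars.isdigit c = false ∧ PySem.Chars.isupper c = false ∧
    abcx_dict.contains c = true ∧ PySem.Chars.islower c = false := by
  unfold clsB at h; rw [← abcx_contains_eq] at h; split_ifs at h <;> simp_all

theorem cls_s (c : Char) (h : clsB c = some .s) :
    PySem.Chars.isdigit c = false ∧ PySem.Chars.isupper c = false ∧
    abcx_dict.contains c = false ∧ special_dict.contains c = true := by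
  unfold clsB at h; rw [← abcx_contains_eq, ← spec_contains_eq] at h; split_ifs at h <;> simp_all

theorem cls_none (c : Char) (h : clsB c = none) :
    PySem.Chars.isdigit c = false ∧ PySem.Chars.isupper c = false ∧
    abcx_dict.contains c = false ∧ special_dict.contains c = false := by
  unfold clsB at h; rw [← abcx_contains_eq, ← spec_contains_eq] at h; split_ifs at h <;> simp_all

-- unknown chars neither emit nor change state, so A restricted to the filtered list is unchanged
theorem aRec_filter (cs : List Char) : ∀ (cap num : Bool),
    aRec (cs.filter (fun c => (clsB c).isSome)) cap num = aRec cs cap num := by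
  induction cs with
  | nil => intro cap num; rfl
  | cons c cs ih =>
    intro cap num
    by_cases h : (clsB c).isSome
    · rw [List.filter_cons_of_pos (by simpa using h)]
      simp only [aRec]; split_ifs <;> simp [ih]
    · rw [List.filter_cons_of_neg (by simpa using h)]
      obtain ⟨h1, h2, h3, h4⟩ := cls_none c (Option.not_isSome_iff_eq_none.mp h)
      rw [ih]
      conv_rhs => rw [aRec]
      simp [h1, h2, h3, h4]

-- cap is only read by the uppercase branch, so it is irrelevant before a known non-upper char
theorem aRec_cap_irrel (c : Char) (cs : List Char) (cap num : Bool)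
    (hk : (clsB c).isSome) (h : clsB c ≠ some .u) :
    aRec (c :: cs) cap num = aRec (c :: cs) false num := by
  rcases hv : clsB c with _ | k
  · simp [hv] at hk
  cases k with
  | u => exact absurd hv h
  | d =>
    have hd := (cls_d_iff c).mp hv
    simp [aRec, hd]
  | l =>
    obtain ⟨h1, h2, h3, _⟩ := cls_l c hv
    simp [aRec, h1, h2, h3]
  | p =>
    obtain ⟨h1, h2, h3, _⟩ := cls_p c hv
    simp [aRec, h1, h2, h3]
  | s =>
    obtain ⟨h1, h2, h3, h4⟩ := cls_s c hv
    simp [aRec, h1, h2, h3, h4]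

-- with a known non-digit head, num = true only prepends after_num before letters
theorem aRec_num_split (c : Char) (cs : List Char) (cap : Bool)
    (hk : (clsB c).isSome) (h : PySem.Chars.isdigit c = false) :
    aRec (c :: cs) cap true =
      (if PySem.Chars.isupper c || (abcx_dict.contains c && PySem.Chars.islower c)
       then [after_num] else []) ++ aRec (c :: cs) cap false := by
  rcases hv : clsB c with _ | k
  · simp [hv] at hk
  cases k with
  | d => exact absurd ((cls_d_iff c).mp hv) (by simp [h])
  | u =>
    obtain ⟨h1, h2⟩ := cls_u c hv
    simp [aRec, h1, h2]
  | l =>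
    obtain ⟨h1, h2, h3, h4⟩ := cls_l c hv
    simp [aRec, h1, h2, h3, h4]
  | p =>
    obtain ⟨h1, h2, h3, h4⟩ := cls_p c hv
    simp [aRec, h1, h2, h3, h4]
  | s =>
    obtain ⟨h1, h2, h3, h4⟩ := cls_s c hv
    simp [aRec, h1, h2, h3, h4]

-- an uppercase ASCII letter lowercases to a key of abcx_dict
theorem upper_lower_abcx (c : Char) (h : PySem.Chars.isupper c = true) :
    abcx_dict.contains (PySem.Chars.lowerChar c) = true := by
  unfold PySem.Chars.isupper at h
  rw [Bool.and_eq_true, decide_eq_true_eq, decide_eq_true_eq] at h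
  obtain ⟨ha, hb⟩ := h
  have hlo : 65 ≤ c.toNat := ha
  have hhi : c.toNat ≤ 90 := hb
  interval_cases hn : c.toNat <;> rw [char_eq_of_toNat c _ hn] <;> decide

-- run lemmas: a homogeneous run emits its (B-decoded) patterns and hands over a fixed state
theorem run_d (run : List Char) : ∀ rest, (∀ c ∈ run, clsB c = some .d) →
    aRec (run ++ rest) false true = run.map numPatB ++ aRec rest false true := by
  induction run with
  | nil => intro rest _; rfl
  | cons c r ih =>
    intro rest h
    have hd : PySem.Chars.isdigit c = true := (cls_d_iff c).mp (h c (by simp))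
    simp only [List.cons_append, aRec, hd, if_true, List.map_cons]
    simp [ih rest (fun x hx => h x (by simp [hx])), bridge_digit c hd]

theorem run_u (run : List Char) : ∀ rest, (∀ c ∈ run, clsB c = some .u) →
    aRec (run ++ rest) true false =
      run.map (fun x => abcxPatB (PySem.Chars.lowerChar x)) ++ aRec rest true false := by
  induction run with
  | nil => intro rest _; rfl
  | cons c r ih =>
    intro rest h
    obtain ⟨h1, h2⟩ := cls_u c (h c (by simp))
    have hlc : abcx_dict.contains (PySem.Chars.lowerChar c) = true := upper_lower_abcx c h2
    simp only [List.cons_append, aRec, h1, h2, List.map_cons]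
    simp [ih rest (fun x hx => h x (by simp [hx])), bridge_abcx _ hlc]

theorem run_lp (run : List Char) : ∀ rest, (∀ c ∈ run, clsB c = some .l ∨ clsB c = some .p) →
    aRec (run ++ rest) false false = run.map abcxPatB ++ aRec rest false false := by
  induction run with
  | nil => intro rest _; rfl
  | cons c r ih =>
    intro rest h
    have h1 : PySem.Chars.isdigit c = false ∧ PySem.Chars.isupper c = false ∧
        abcx_dict.contains c = true := by
      rcases h c (by simp) with hc | hc
      · exact ⟨(cls_l c hc).1, (cls_l c hc).2.1, (cls_l c hc).2.2.1⟩
      · exact ⟨(cls_p c hc).1, (cls_p c hc).2.1, (cls_p c hc).2.2.1⟩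
    obtain ⟨ha, hb, hc'⟩ := h1
    simp only [List.cons_append, aRec, ha, hb, hc', List.map_cons]
    simp [ih rest (fun x hx => h x (by simp [hx])), bridge_abcx c hc']

theorem run_s (run : List Char) : ∀ rest, (∀ c ∈ run, clsB c = some .s) →
    aRec (run ++ rest) false false = (run.map specPatsB).flatten ++ aRec rest false false := by
  induction run with
  | nil => intro rest _; rfl
  | cons c r ih =>
    intro rest h
    obtain ⟨h1, h2, h3, h4⟩ := cls_s c (h c (by simp))
    simp only [List.cons_append, aRec, h1, h2, h3, h4, List.map_cons, List.flatten_cons]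
    simp [ih rest (fun x hx => h x (by simp [hx])), bridge_spec c h4]

-- the after_num test of B's lookahead agrees with A's letter test (head known non-digit)
theorem afterNum_iff (c : Char) (h : PySem.Chars.isdigit c = false) :
    ((clsB c == some BCls.u || clsB c == some BCls.l) : Bool) =
      (PySem.Chars.isupper c || (abcx_dict.contains c && PySem.Chars.islower c)) := by
  unfold clsB; rw [abcx_contains_eq]; split_ifs <;> simp_all

-- a survivor of dropWhile fails p
theorem dropWhile_head_false {α : Type} (p : α → Bool) :
    ∀ (l : List α) (d : α) (r : List α), l.dropWhile p = d :: r → p d = false := by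
  intro l
  induction l with
  | nil => intro d r h; simp at h
  | cons a l ih =>
    intro d r h
    by_cases hpa : p a = true
    · rw [List.dropWhile_cons_of_pos hpa] at h; exact ih d r h
    · rw [List.dropWhile_cons_of_neg hpa] at h
      cases h; simpa using hpa

-- the main equivalence on a filtered (all-translatable) list, by strong induction on length
theorem main_runs : ∀ (n : Nat) (toks : List Char), toks.length ≤ n →
    (∀ c ∈ toks, (clsB c).isSome) →
    emitRuns (runsOf toks) = aRec toks false false := by
  intro n
  induction n with
  | zero =>
    intro toks hlen _
    have : toks = [] := List.eq_nil_of_length_eq_zero (Nat.le_zero.mp hlen)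
    subst this
    rw [runsOf]; rfl
  | succ n ih =>
    intro toks hlen hknown
    match toks with
    | [] => rw [runsOf]; rfl
    | c :: cs =>
      set p : Char → Bool := fun x => clsB x == clsB c with hp
      have hsplit : cs.takeWhile p ++ cs.dropWhile p = cs := List.takeWhile_append_dropWhile
      have htake : ∀ x ∈ cs.takeWhile p, clsB x = clsB c := by
        intro x hx
        exact eq_of_beq (by simpa [hp] using List.mem_takeWhile_imp hx)
      have hrestlen : (cs.dropWhile p).length ≤ n := by
        have := List.length_dropWhile_le p cs
        simp at hlen; omega
      have hrestknown : ∀ x ∈ cs.dropWhile p, (clsB x).isSome := by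
        intro x hx
        exact hknown x (List.mem_cons_of_mem _ ((List.dropWhile_sublist p).mem hx))
      have ihrest := ih (cs.dropWhile p) hrestlen hrestknown
      have hrun : runsOf (c :: cs) = (c :: cs.takeWhile p) :: runsOf (cs.dropWhile p) := by
        rw [runsOf]
      have hheadrest : ∀ d r, cs.dropWhile p = d :: r → clsB d ≠ clsB c := by
        intro d r hdr hcd
        have := dropWhile_head_false p cs d r hdr
        simp [hp, hcd] at this
      have hcknown : (clsB c).isSome := hknown c (by simp)
      rw [hrun]
      rcases hcls : clsB c with _ | k
      · simp [hcls] at hcknown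
      cases k with
      | d =>
        have hcd : PySem.Chars.isdigit c = true := (cls_d_iff c).mp hcls
        have halltake : ∀ x ∈ cs.takeWhile p, clsB x = some BCls.d := by
          intro x hx; rw [htake x hx, hcls]
        have hrd : aRec cs false true =
            (cs.takeWhile p).map numPatB ++ aRec (cs.dropWhile p) false true := by
          conv_lhs => rw [← hsplit]
          exact run_d (cs.takeWhile p) (cs.dropWhile p) halltake
        have hA : aRec (c :: cs) false false =
            cellsB PRE_NUM :: numPatB c ::
              ((cs.takeWhile p).map numPatB ++ aRec (cs.dropWhile p) false true) := by
          simp [aRec, hcd, hrd, bridge_digit c hcd, pre_num_eq]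
        rw [hA]
        simp only [emitRuns, hcls, List.map_cons, List.cons_append]
        congr 3
        rcases hdr : cs.dropWhile p with _ | ⟨d0, r0⟩
        · rw [runsOf]
          simp [aRec, emitRuns, nextIsLetter]
        · rw [hdr] at ihrest
          have hdknown := hrestknown d0 (by simp [hdr])
          have hdnotd : clsB d0 ≠ some .d := by
            intro hcon
            exact hheadrest d0 r0 hdr (by rw [hcon, hcls])
          have hdd : PySem.Chars.isdigit d0 = false := by
            cases hb : PySem.Chars.isdigit d0
            · rfl
            · exact absurd ((cls_d_iff d0).mpr hb) hdnotd
          have hrunrest : runsOf (d0 :: r0) = (d0 :: r0.takeWhile (fun x => clsB x == clsB d0)) ::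
              runsOf (r0.dropWhile (fun x => clsB x == clsB d0)) := by rw [runsOf]
          rw [aRec_num_split d0 r0 false hdknown hdd, ← afterNum_iff d0 hdd, ← ihrest, hrunrest]
          simp only [nextIsLetter]
          by_cases hb : (clsB d0 == some BCls.u || clsB d0 == some BCls.l) = true
          · simp [hb, after_num_eq]
          · simp [hb]
      | u =>
        obtain ⟨h1, h2⟩ := cls_u c hcls
        have halltake : ∀ x ∈ cs.takeWhile p, clsB x = some BCls.u := by
          intro x hx; rw [htake x hx, hcls]
        have hru : aRec cs true false =
            (cs.takeWhile p).map (fun x => abcxPatB (PySem.Chars.lowerChar x)) ++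
              aRec (cs.dropWhile p) true false := by
          conv_lhs => rw [← hsplit]
          exact run_u (cs.takeWhile p) (cs.dropWhile p) halltake
        have hcap : aRec (cs.dropWhile p) true false = aRec (cs.dropWhile p) false false := by
          rcases hdr : cs.dropWhile p with _ | ⟨d0, r0⟩
          · rfl
          · have hdnotu : clsB d0 ≠ some .u := by
              intro hcon
              exact hheadrest d0 r0 hdr (by rw [hcon, hcls])
            exact aRec_cap_irrel d0 r0 true false (hrestknown d0 (by simp [hdr])) hdnotu
        have hlc : abcx_dict.contains (PySem.Chars.lowerChar c) = true := upper_lower_abcx c h2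
        have h2' : PySem.Chars.isupper c = true := (cls_u c hcls).2
        have hA : aRec (c :: cs) false false =
            cellsB PRE_CAP :: cellsB PRE_CAP :: (abcxPatB (PySem.Chars.lowerChar c) ::
              ((cs.takeWhile p).map (fun x => abcxPatB (PySem.Chars.lowerChar x)) ++
                aRec (cs.dropWhile p) false false)) := by
          simp [aRec, h1, h2', hru, hcap, pre_cap_eq, bridge_abcx _ hlc]
        rw [hA]
        simp [emitRuns, hcls, ihrest]
      | l =>
        obtain ⟨h1, h2, h3, h4⟩ := cls_l c hcls
        have halltake : ∀ x ∈ cs.takeWhile p, clsB x = some BCls.l ∨ clsB x = some BCls.p := by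
          intro x hx; rw [htake x hx, hcls]; exact Or.inl rfl
        have hr : aRec cs false false =
            (cs.takeWhile p).map abcxPatB ++ aRec (cs.dropWhile p) false false := by
          conv_lhs => rw [← hsplit]
          exact run_lp (cs.takeWhile p) (cs.dropWhile p) halltake
        have hA : aRec (c :: cs) false false =
            abcxPatB c :: ((cs.takeWhile p).map abcxPatB ++ aRec (cs.dropWhile p) false false) := by
          simp [aRec, h1, h2, h3, hr, bridge_abcx c h3]
        rw [hA]
        simp [emitRuns, hcls, ihrest]
      | p =>
        obtain ⟨h1, h2, h3, h4⟩ := cls_p c hcls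
        have halltake : ∀ x ∈ cs.takeWhile p, clsB x = some BCls.l ∨ clsB x = some BCls.p := by
          intro x hx; rw [htake x hx, hcls]; exact Or.inr rfl
        have hr : aRec cs false false =
            (cs.takeWhile p).map abcxPatB ++ aRec (cs.dropWhile p) false false := by
          conv_lhs => rw [← hsplit]
          exact run_lp (cs.takeWhile p) (cs.dropWhile p) halltake
        have hA : aRec (c :: cs) false false =
            abcxPatB c :: ((cs.takeWhile p).map abcxPatB ++ aRec (cs.dropWhile p) false false) := by
          simp [aRec, h1, h2, h3, hr, bridge_abcx c h3]
        rw [hA]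
        simp [emitRuns, hcls, ihrest]
      | s =>
        obtain ⟨h1, h2, h3, h4⟩ := cls_s c hcls
        have halltake : ∀ x ∈ cs.takeWhile p, clsB x = some BCls.s := by
          intro x hx; rw [htake x hx, hcls]
        have hr : aRec cs false false =
            ((cs.takeWhile p).map specPatsB).flatten ++ aRec (cs.dropWhile p) false false := by
          conv_lhs => rw [← hsplit]
          exact run_s (cs.takeWhile p) (cs.dropWhile p) halltake
        have hA : aRec (c :: cs) false false =
            specPatsB c ++ (((cs.takeWhile p).map specPatsB).flatten ++
              aRec (cs.dropWhile p) false false) := by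
          simp [aRec, h1, h2, h3, h4, hr, bridge_spec c h4]
        rw [hA]
        simp [emitRuns, hcls, ihrest]

-- ===== VERDICT (by name: the statement is the Claim_ definition above) =====
theorem uncontracted_translation_spec : Claim_equal_uncontracted_translation := by
  intro s _
  unfold Spec_uncontracted_translation uncontracted_translation uncontracted_translation_alt
  rw [foldA, List.nil_append]
  rw [main_runs (s.toList.filter (fun c => (clsB c).isSome)).length _ le_rfl
    (by intro c hc; exact (List.mem_filter.mp hc).2)]
  exact (aRec_filter s.toList false false).symm
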